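-- pv_equiv track=rewrite | github.com/MrBrantCode/unitest_baseline | mut_generate/mist_train_taco/taco_919/solution.py | count_ways_to_make_squares_white
-- ===== SOURCE A (Python) =====
-- from math import factorial
--
-- def count_ways_to_make_squares_white(N, S):
--     mod = 10 ** 9 + 7
--
--     # Early exit if the first or last square is white
--     if S[0] == 'W' or S[-1] == 'W':
--         return 0
--
--     # Initialize the array to track the parity of the operations
--     arr = ['L']
--     swap_dict = {'L': 'R', 'R': 'L'}
--
--     # Fill the array based on the parity of the operations
--     for i in range(1, 2 * N):
--         arr.append(arr[i - 1] if S[i] != S[i - 1] else swap_dict[arr[i - 1]])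
--
--     # Check if the number of 'L' and 'R' operations are balanced
--     if arr.count('L') != arr.count('R'):
--         return 0
--
--     # Calculate the number of ways to perform the operations
--     cnt_tmp = 0
--     cnt_swap = 1
--     for a in arr:
--         if a == 'L':
--             cnt_tmp += 1
--         else:
--             cnt_swap = cnt_swap * cnt_tmp % mod
--             cnt_tmp -= 1
--
--     # Return the result modulo 10^9 + 7
--     return cnt_swap * factorial(N) % mod
-- ===== SOURCE B (Python) =====
-- from math import factorial
-- from itertools import groupby
--
-- def count_ways_to_make_squares_white(N, S):
--     # Run-length-encoding algorithm: instead of materialising the per-square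
--     # L/R label array, group the scanned squares into maximal runs of equal
--     # characters.  Labels alternate inside a run and carry over across run
--     # boundaries, so each run of length l contributes a closed-form factor
--     # (a modular power) to the product and O(1) updates to the tallies.
--     mod = 10 ** 9 + 7
--     if S[0] == 'W' or S[-1] == 'W':
--         return 0
--     runs = [sum(1 for _ in g) for _, g in groupby(S[i] for i in range(max(1, 2 * N)))]
--     sL = True        # entry label of the current run ('L' = True)
--     balance = 0      # (#L) - (#R)
--     open_cnt = 0     # pending opens
--     prod = 1
--     for l in runs:
--         half = l // 2
--         odd = l % 2
--         if sL:
--             balance += odd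
--             prod = prod * pow(open_cnt + 1, half, mod) % mod
--             open_cnt += odd
--         else:
--             balance -= odd
--             prod = prod * pow(open_cnt, half + odd, mod) % mod
--             open_cnt -= odd
--         if odd == 0:
--             sL = not sL
--     if balance != 0:
--         return 0
--     return prod * factorial(N) % mod
-- ===== Notes on version B (the rewrite author's own statement) =====
-- stated objective: alternative
-- what changed: B replaces A's per-square L/R label array and swap dictionary by a run-length encoding of the scanned squares (itertools.groupby): labels alternate inside a run and carry over across boundaries, so each run contributes one closed-form modular power pow(open,half,mod) and O(1) balance/open updates instead of A's per-element array build plus two count scans and a product scan.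
import Mathlib
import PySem

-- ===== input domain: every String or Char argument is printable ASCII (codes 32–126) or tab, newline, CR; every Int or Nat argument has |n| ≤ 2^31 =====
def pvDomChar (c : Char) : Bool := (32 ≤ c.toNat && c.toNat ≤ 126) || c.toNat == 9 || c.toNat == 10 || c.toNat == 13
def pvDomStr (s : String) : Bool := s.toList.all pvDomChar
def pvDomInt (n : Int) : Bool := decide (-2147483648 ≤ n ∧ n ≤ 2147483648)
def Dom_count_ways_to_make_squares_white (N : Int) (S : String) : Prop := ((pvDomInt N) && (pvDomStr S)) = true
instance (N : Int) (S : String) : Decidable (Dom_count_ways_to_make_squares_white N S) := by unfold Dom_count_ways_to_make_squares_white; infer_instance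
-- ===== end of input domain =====

-- B replaces A's per-square L/R label array by a run-length encoding of the scanned
-- squares: labels alternate inside a run, so each run contributes one modular power
-- and O(1) tally updates; objective: alternative algorithm, same asymptotic cost.

-- ===== PORT A =====
-- math.factorial; exact for the nonnegative arguments on which A evaluates it
def pvFactorial (n : Int) : Int := (Nat.factorial n.toNat : Int)

-- swap_dict = {'L': 'R', 'R': 'L'}
def pvSwapDict : PySem.Dict Char Char := (PySem.Dict.empty.insert 'L' 'R').insert 'R' 'L'

-- one iteration of A's first loop: arr.append(arr[i-1] if S[i] != S[i-1] else swap_dict[arr[i-1]])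
-- (list/str indexing via pyGet?; the .getD defaults are never hit inside Pre_)
def pvStepA (S : String) (arr : List Char) (i : Int) : List Char :=
  arr ++ [if (PySem.Str.pyGet? S i).getD ' ' ≠ (PySem.Str.pyGet? S (i - 1)).getD ' '
          then (PySem.List.pyGet? arr (i - 1)).getD 'L'
          else (pvSwapDict.get? ((PySem.List.pyGet? arr (i - 1)).getD 'L')).getD 'L']

-- one iteration of A's second loop over arr; st = (cnt_swap, cnt_tmp)
def pvStepA2 (md : Int) (st : Int × Int) (a : Char) : Int × Int :=
  if a == 'L' then (st.1, st.2 + 1) else (PySem.Int.mod (st.1 * st.2) md, st.2 - 1)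

def count_ways_to_make_squares_white (N : Int) (S : String) : Int :=
  let md : Int := 10 ^ 9 + 7
  if (PySem.Str.pyGet? S 0).getD ' ' == 'W' || (PySem.Str.pyGet? S (-1)).getD ' ' == 'W' then 0
  else
    let arr := (PySem.List.pyRange 1 (2 * N) 1).foldl (pvStepA S) ['L']
    if PySem.List.count arr 'L' ≠ PySem.List.count arr 'R' then 0
    else
      let st := arr.foldl (pvStepA2 md) (1, 0)
      PySem.Int.mod (st.1 * pvFactorial N) md

-- ===== PORT B =====
-- run lengths of the groupby of a char list: pvRleAux c n ds = lengths of the maximal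
-- equal runs of (c^n ++ ds) (itertools.groupby with the running count n)
def pvRleAux (c : Char) (n : Nat) : List Char → List Nat
  | [] => [n]
  | d :: ds => if d = c then pvRleAux c (n + 1) ds else n :: pvRleAux d 1 ds

-- the scanned squares (S[i] for i in range(max(1, 2*N)))
def pvChars (N : Int) (S : String) : List Char :=
  (PySem.List.pyRange 0 (max 1 (2 * N)) 1).map (fun i => (PySem.Str.pyGet? S i).getD ' ')

-- one iteration of B's loop over the run lengths; st = (sL, balance, open_cnt, prod)
def pvStepRun (md : Int) (st : Bool × Int × Int × Int) (l : Nat) : Bool × Int × Int × Int :=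
  let half := l / 2
  let odd := l % 2
  let st' : Bool × Int × Int × Int :=
    if st.1 then
      (st.1, st.2.1 + (odd : Int), st.2.2.1 + (odd : Int),
       PySem.Int.mod (st.2.2.2 * PySem.Int.powMod (st.2.2.1 + 1) half md) md)
    else
      (st.1, st.2.1 - (odd : Int), st.2.2.1 - (odd : Int),
       PySem.Int.mod (st.2.2.2 * PySem.Int.powMod st.2.2.1 (half + odd) md) md)
  if odd = 0 then (!st'.1, st'.2) else st'

def count_ways_to_make_squares_white_alt (N : Int) (S : String) : Int :=
  let md : Int := 10 ^ 9 + 7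
  if (PySem.Str.pyGet? S 0).getD ' ' == 'W' || (PySem.Str.pyGet? S (-1)).getD ' ' == 'W' then 0
  else
    let runs := match pvChars N S with
      | [] => []
      | c :: rest => pvRleAux c 1 rest
    let st := runs.foldl (pvStepRun md) (true, 0, 0, 1)
    if st.2.1 ≠ 0 then 0
    else PySem.Int.mod (st.2.2.2 * pvFactorial N) md

-- ===== PRECONDITION & SPEC =====
-- Pre_ excludes exactly the inputs where Python A raises: empty S (IndexError on S[0]),
-- and strings too short for the loop's S[i] accesses unless the first/last-'W' guard
-- returns early before the loop runs.
def Pre_count_ways_to_make_squares_white (N : Int) (S : String) : Prop :=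
  S.toList ≠ [] ∧
  (S.toList.head? = some 'W' ∨ S.toList.getLast? = some 'W' ∨ 2 * N ≤ (S.toList.length : Int))
instance (N : Int) (S : String) : Decidable (Pre_count_ways_to_make_squares_white N S) := by
  unfold Pre_count_ways_to_make_squares_white; infer_instance

def pvWitness_count_ways_to_make_squares_white : Int × String := (2, "BWWB")

def Spec_count_ways_to_make_squares_white (N : Int) (S : String) (out : Int) : Prop := out = count_ways_to_make_squares_white_alt N S
instance (N : Int) (S : String) (out : Int) : Decidable (Spec_count_ways_to_make_squares_white N S out) := by unfold Spec_count_ways_to_make_squares_white; infer_instance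

-- ===== CLAIM (what is proved, stated in full; the proofs are below) =====
def Claim_equal_count_ways_to_make_squares_white : Prop := ∀ (N : Int) (S : String), Dom_count_ways_to_make_squares_white N S → Pre_count_ways_to_make_squares_white N S → Spec_count_ways_to_make_squares_white N S (count_ways_to_make_squares_white N S)

-- ===== LEMMAS AND PROOFS =====

-- proof-only vocabulary: boolean labels (true = 'L'), A's label sequence as a scan,
-- and its decomposition into alternating blocks driven by the run lengths
def pvToChar (b : Bool) : Char := if b then 'L' else 'R'

def pvCh (S : String) (i : Int) : Char := (PySem.Str.pyGet? S i).getD ' '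

-- the labels A assigns after the first square: flip on an equal adjacency, keep otherwise
def pvStFrom (s : Bool) (c : Char) : List Char → List Bool
  | [] => []
  | d :: ds => (if d = c then !s else s) :: pvStFrom (if d = c then !s else s) d ds

-- l alternating labels starting with x
def pvBlock (x : Bool) : Nat → List Bool
  | 0 => []
  | l + 1 => x :: pvBlock (!x) l

-- labels of full runs, entry label x (boundary keeps the label, so a run starts at x)
def pvGoB (x : Bool) : List Nat → List Bool
  | [] => []
  | l :: rest => pvBlock x l ++ pvGoB (if l % 2 = 1 then x else !x) rest

-- labels of a partially emitted first run: n of its squares already labelled, last label s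
def pvGoW (s : Bool) (n : Nat) : List Nat → List Bool
  | [] => []
  | l :: rest => pvBlock (!s) (l - n) ++ pvGoB (if (l - n) % 2 = 0 then s else !s) rest

-- A's balance/open/product scan fused over the boolean labels; st = (bal, opn, prd)
def pvFoldA (md : Int) (st : Int × Int × Int) (b : Bool) : Int × Int × Int :=
  if b then (st.1 + 1, st.2.1 + 1, st.2.2)
  else (st.1 - 1, st.2.1 - 1, PySem.Int.mod (st.2.2 * st.2.1) md)

theorem pvRleAux_head (ds : List Char) : ∀ (c : Char) (n : Nat),
    ∃ l rest, pvRleAux c n ds = l :: rest ∧ n ≤ l := by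
  induction ds with
  | nil => intro c n; exact ⟨n, [], rfl, le_refl n⟩
  | cons d ds ih =>
    intro c n
    by_cases h : d = c
    · obtain ⟨l, rest, he, hle⟩ := ih c (n + 1)
      exact ⟨l, rest, by simp [pvRleAux, h, he], by omega⟩
    · exact ⟨n, pvRleAux d 1 ds, by simp [pvRleAux, h], le_refl n⟩

theorem pvParityIf (m : Nat) (s : Bool) :
    (if m % 2 = 0 then !s else s) = (if (m + 1) % 2 = 0 then s else !s) := by
  by_cases h2 : m % 2 = 0
  · have h3 : (m + 1) % 2 = 1 := by omega
    simp [h2, h3]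
  · have h3 : (m + 1) % 2 = 0 := by omega
    simp [h2, h3]

theorem pvGoB_cons_goW1 (l : Nat) (rest : List Nat) (s : Bool) (hl : 1 ≤ l) :
    pvGoB s (l :: rest) = s :: pvGoW s 1 (l :: rest) := by
  obtain ⟨l', rfl⟩ : ∃ l', l = l' + 1 := ⟨l - 1, by omega⟩
  simp only [pvGoB, pvGoW, Nat.add_sub_cancel, pvBlock, List.cons_append]
  have hp : (if (l' + 1) % 2 = 1 then s else !s) = (if l' % 2 = 0 then s else !s) := by
    by_cases h2 : l' % 2 = 0
    · have h3 : (l' + 1) % 2 = 1 := by omega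
      simp [h2, h3]
    · have h3 : (l' + 1) % 2 = 0 := by omega
      simp [h2, h3]
  rw [hp]

theorem pvStFrom_eq_goW (ds : List Char) : ∀ (c : Char) (s : Bool) (n : Nat),
    pvStFrom s c ds = pvGoW s n (pvRleAux c n ds) := by
  induction ds with
  | nil =>
    intro c s n
    simp [pvStFrom, pvRleAux, pvGoW, pvGoB, pvBlock]
  | cons d ds ih =>
    intro c s n
    by_cases h : d = c
    · obtain ⟨l, rest, he, hle⟩ := pvRleAux_head ds c (n + 1)
      have hrle : pvRleAux c n (d :: ds) = l :: rest := by simp [pvRleAux, h, he]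
      have hstep : pvStFrom s c (d :: ds) = (!s) :: pvStFrom (!s) c ds := by
        simp [pvStFrom, h]
      rw [hrle, hstep, ih c (!s) (n + 1), he]
      obtain ⟨m, rfl⟩ : ∃ m, l = n + 1 + m := ⟨l - (n + 1), by omega⟩
      have e1 : n + 1 + m - n = m + 1 := by omega
      have e2 : n + 1 + m - (n + 1) = m := by omega
      simp only [pvGoW, e1, e2, pvBlock, Bool.not_not, List.cons_append]
      rw [pvParityIf m s]
    · have hrle : pvRleAux c n (d :: ds) = n :: pvRleAux d 1 ds := by simp [pvRleAux, h]
      have hstep : pvStFrom s c (d :: ds) = s :: pvStFrom s d ds := by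
        simp [pvStFrom, h]
      rw [hrle, hstep, ih d s 1]
      obtain ⟨l, rest, he, hle⟩ := pvRleAux_head ds d 1
      rw [he, ← pvGoB_cons_goW1 l rest s hle]
      simp [pvGoW, pvBlock, pvGoB]

theorem pvTop (rest : List Char) (c : Char) (s : Bool) :
    s :: pvStFrom s c rest = pvGoB s (pvRleAux c 1 rest) := by
  rw [pvStFrom_eq_goW rest c s 1]
  obtain ⟨l, rs, he, hle⟩ := pvRleAux_head rest c 1
  rw [he, pvGoB_cons_goW1 l rs s hle]

theorem pvMulModL (md a b : Int) (h : 0 < md) :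
    PySem.Int.mod (PySem.Int.mod a md * b) md = PySem.Int.mod (a * b) md := by
  rw [PySem.Int.mod_eq_emod_of_pos h, PySem.Int.mod_eq_emod_of_pos h,
      PySem.Int.mod_eq_emod_of_pos h, Int.mul_emod, Int.emod_emod_of_dvd _ dvd_rfl,
      ← Int.mul_emod]

theorem pvMulModR (md a b : Int) (h : 0 < md) :
    PySem.Int.mod (a * PySem.Int.mod b md) md = PySem.Int.mod (a * b) md := by
  rw [mul_comm a, pvMulModL md b a h, mul_comm b]

theorem pvBlockEven (md : Int) (hmd : 0 < md) : ∀ (k : Nat) (x : Bool) (bal opn prd : Int),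
    0 ≤ prd → prd < md →
    (pvBlock x (2 * k)).foldl (pvFoldA md) (bal, opn, prd)
      = (bal, opn, PySem.Int.mod (prd * (if x then opn + 1 else opn) ^ k) md) := by
  intro k
  induction k with
  | zero =>
    intro x bal opn prd h0 h1
    simp only [pvBlock, List.foldl_nil, pow_zero, mul_one]
    rw [PySem.Int.mod_eq_emod_of_pos hmd, Int.emod_eq_of_lt h0 h1]
  | succ k ih =>
    intro x bal opn prd h0 h1
    have h2 : 2 * (k + 1) = (2 * k) + 1 + 1 := by ring
    rw [h2]
    cases x
    · have e1 : pvFoldA md (bal, opn, prd) false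
          = (bal - 1, opn - 1, PySem.Int.mod (prd * opn) md) := rfl
      have e2 : pvFoldA md (bal - 1, opn - 1, PySem.Int.mod (prd * opn) md) true
          = (bal, opn, PySem.Int.mod (prd * opn) md) := by
        have h' : pvFoldA md (bal - 1, opn - 1, PySem.Int.mod (prd * opn) md) true
            = (bal - 1 + 1, opn - 1 + 1, PySem.Int.mod (prd * opn) md) := rfl
        rw [h']
        refine Prod.ext ?_ (Prod.ext ?_ rfl)
        · show bal - 1 + 1 = bal
          ring
        · show opn - 1 + 1 = opn
          ring
      simp only [pvBlock, Bool.not_false, Bool.not_true, List.foldl_cons, e1, e2]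
      rw [ih false bal opn _ (PySem.Int.mod_nonneg _ hmd) (PySem.Int.mod_lt _ hmd)]
      simp only [Bool.false_eq_true, if_false]
      rw [pvMulModL md _ _ hmd]
      congr 1
      ring
    · have e1 : pvFoldA md (bal, opn, prd) true = (bal + 1, opn + 1, prd) := rfl
      have e2 : pvFoldA md (bal + 1, opn + 1, prd) false
          = (bal, opn, PySem.Int.mod (prd * (opn + 1)) md) := by
        have h' : pvFoldA md (bal + 1, opn + 1, prd) false
            = (bal + 1 - 1, opn + 1 - 1, PySem.Int.mod (prd * (opn + 1)) md) := rfl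
        rw [h']
        refine Prod.ext ?_ (Prod.ext ?_ rfl)
        · show bal + 1 - 1 = bal
          ring
        · show opn + 1 - 1 = opn
          ring
      simp only [pvBlock, Bool.not_false, Bool.not_true, List.foldl_cons, e1, e2]
      rw [ih true bal opn _ (PySem.Int.mod_nonneg _ hmd) (PySem.Int.mod_lt _ hmd)]
      simp only [if_true]
      rw [pvMulModL md _ _ hmd]
      congr 1
      ring

theorem pvBlockFold (md : Int) (hmd : 0 < md) (l : Nat) (x : Bool) (bal opn prd : Int)
    (h0 : 0 ≤ prd) (h1 : prd < md) :
    (pvBlock x l).foldl (pvFoldA md) (bal, opn, prd)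
      = (if x then bal + (l % 2 : Nat) else bal - (l % 2 : Nat),
         if x then opn + (l % 2 : Nat) else opn - (l % 2 : Nat),
         PySem.Int.mod (prd * (if x then (opn + 1) ^ (l / 2) else opn ^ (l / 2 + l % 2))) md) := by
  rcases Nat.even_or_odd l with ⟨k, hk⟩ | ⟨k, hk⟩
  · have h2 : l = 2 * k := by omega
    have ediv : 2 * k / 2 = k := by omega
    have emod : 2 * k % 2 = 0 := by omega
    rw [h2, ediv, emod]
    rw [pvBlockEven md hmd k x bal opn prd h0 h1]
    cases x <;> simp
  · have h2 : l = 2 * k + 1 := by omega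
    have ediv : (2 * k + 1) / 2 = k := by omega
    have emod : (2 * k + 1) % 2 = 1 := by omega
    rw [h2, ediv, emod]
    cases x
    · have e1 : pvFoldA md (bal, opn, prd) false
          = (bal - 1, opn - 1, PySem.Int.mod (prd * opn) md) := rfl
      simp only [pvBlock, Bool.not_false, List.foldl_cons, e1]
      rw [pvBlockEven md hmd k true (bal - 1) (opn - 1) _
        (PySem.Int.mod_nonneg _ hmd) (PySem.Int.mod_lt _ hmd)]
      have e3 : opn - 1 + 1 = opn := by ring
      rw [e3, pvMulModL md _ _ hmd]
      simp only [Bool.false_eq_true, if_false, Nat.cast_one]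
      refine Prod.ext rfl (Prod.ext rfl ?_)
      show PySem.Int.mod (prd * opn * opn ^ k) md = PySem.Int.mod (prd * opn ^ (k + 1)) md
      congr 1
      ring
    · have e1 : pvFoldA md (bal, opn, prd) true = (bal + 1, opn + 1, prd) := rfl
      simp only [pvBlock, Bool.not_true, List.foldl_cons, e1]
      rw [pvBlockEven md hmd k false (bal + 1) (opn + 1) prd h0 h1]
      simp only [Bool.false_eq_true, if_false, if_true, Nat.cast_one]

theorem pvMain (md : Int) (hmd : 0 < md) : ∀ (runs : List Nat) (x : Bool) (bal opn prd : Int),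
    0 ≤ prd → prd < md →
    (pvGoB x runs).foldl (pvFoldA md) (bal, opn, prd)
      = (runs.foldl (pvStepRun md) (x, bal, opn, prd)).2 := by
  intro runs
  induction runs with
  | nil => intro x bal opn prd h0 h1; simp [pvGoB]
  | cons l rest ih =>
    intro x bal opn prd h0 h1
    have hs : pvStepRun md (x, bal, opn, prd) l
        = ((if l % 2 = 1 then x else !x),
           (if x then bal + (l % 2 : Nat) else bal - (l % 2 : Nat)),
           (if x then opn + (l % 2 : Nat) else opn - (l % 2 : Nat)),
           PySem.Int.mod (prd * (if x then (opn + 1) ^ (l / 2) else opn ^ (l / 2 + l % 2))) md) := by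
      unfold pvStepRun
      by_cases hodd : l % 2 = 0
      · cases x <;> simp [hodd, PySem.Int.powMod_eq, pvMulModR md _ _ hmd]
      · have h1' : l % 2 = 1 := by omega
        cases x <;> simp [h1', PySem.Int.powMod_eq, pvMulModR md _ _ hmd]
    simp only [pvGoB, List.foldl_append, List.foldl_cons]
    rw [pvBlockFold md hmd l x bal opn prd h0 h1, hs]
    exact ih _ _ _ _ (PySem.Int.mod_nonneg _ hmd) (PySem.Int.mod_lt _ hmd)

theorem pvArrEq (S : String) : ∀ (k i : Nat) (arr0 : List Char) (s : Bool), 1 ≤ i →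
    arr0.length = i → arr0.getLast? = some (pvToChar s) →
    (PySem.List.pyRange (i : Int) ((i + k : Nat) : Int) 1).foldl (pvStepA S) arr0
      = arr0 ++ (pvStFrom s (pvCh S ((i : Int) - 1))
          ((List.range' i k).map (fun (j : Nat) => pvCh S (j : Int)))).map pvToChar := by
  intro k
  induction k with
  | zero =>
    intro i arr0 s hi hlen hlast
    rw [PySem.List.pyRange_one_eq_nil (by push_cast; omega)]
    simp [pvStFrom]
  | succ k ih =>
    intro i arr0 s hi hlen hlast
    have hcons : PySem.List.pyRange (i : Int) ((i + (k + 1) : Nat) : Int) 1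
        = (i : Int) :: PySem.List.pyRange ((i : Int) + 1) ((i + (k + 1) : Nat) : Int) 1 :=
      PySem.List.pyRange_one_cons (by push_cast; omega)
    have hgetarr : (PySem.List.pyGet? arr0 ((i : Int) - 1)).getD 'L' = pvToChar s := by
      have hc : (i : Int) - 1 = ((i - 1 : Nat) : Int) := by omega
      rw [hc, PySem.List.pyGet?_natCast]
      have hlg : arr0[i - 1]? = arr0.getLast? := by
        rw [List.getLast?_eq_getElem?, hlen]
      rw [hlg, hlast]
      rfl
    have hswap : ∀ t : Bool, (pvSwapDict.get? (pvToChar t)).getD 'L' = pvToChar (!t) := by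
      intro t; cases t <;> rfl
    have hch : ∀ j : Int, (PySem.Str.pyGet? S j).getD ' ' = pvCh S j := fun _ => rfl
    have hstep : pvStepA S arr0 (i : Int)
        = arr0 ++ [pvToChar (if pvCh S (i : Int) = pvCh S ((i : Int) - 1) then !s else s)] := by
      unfold pvStepA
      simp only [hch]
      by_cases hc : pvCh S (i : Int) = pvCh S ((i : Int) - 1)
      · rw [if_neg (not_not_intro hc), if_pos hc, hgetarr, hswap]
      · rw [if_pos hc, if_neg hc, hgetarr]
    have hrange : List.range' i (k + 1) = i :: List.range' (i + 1) k := List.range'_succ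
    rw [hcons]
    simp only [List.foldl_cons]
    rw [hstep, hrange]
    simp only [List.map_cons]
    have hIH := ih (i + 1)
      (arr0 ++ [pvToChar (if pvCh S (i : Int) = pvCh S ((i : Int) - 1) then !s else s)])
      (if pvCh S (i : Int) = pvCh S ((i : Int) - 1) then !s else s)
      (by omega) (by simp [hlen]) (by rw [List.getLast?_concat])
    have c2 : (i + 1) + k = i + (k + 1) := by omega
    rw [c2] at hIH
    push_cast at hIH
    simp only [add_sub_cancel_right] at hIH
    push_cast
    rw [hIH]
    simp only [pvStFrom, List.map_cons, List.append_assoc, List.cons_append, List.nil_append]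

theorem pvFoldA_spec (md : Int) : ∀ (bl : List Bool) (bal opn prd : Int),
    bl.foldl (pvFoldA md) (bal, opn, prd)
      = (bal + (bl.count true : Int) - (bl.count false : Int),
         ((bl.map pvToChar).foldl (pvStepA2 md) (prd, opn)).2,
         ((bl.map pvToChar).foldl (pvStepA2 md) (prd, opn)).1) := by
  intro bl
  induction bl with
  | nil => intro bal opn prd; simp
  | cons b bl ih =>
    intro bal opn prd
    cases b
    · have e1 : pvFoldA md (bal, opn, prd) false
          = (bal - 1, opn - 1, PySem.Int.mod (prd * opn) md) := rfl
      have e2 : pvStepA2 md (prd, opn) (pvToChar false)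
          = (PySem.Int.mod (prd * opn) md, opn - 1) := rfl
      simp only [List.foldl_cons, List.map_cons, e1, e2, ih]
      rw [List.count_cons_of_ne (by decide : false ≠ true), List.count_cons_self]
      refine Prod.ext ?_ rfl
      show bal - 1 + (bl.count true : Int) - (bl.count false : Int)
          = bal + (bl.count true : Int) - ((bl.count false + 1 : Nat) : Int)
      push_cast
      ring
    · have e1 : pvFoldA md (bal, opn, prd) true = (bal + 1, opn + 1, prd) := rfl
      have e2 : pvStepA2 md (prd, opn) (pvToChar true) = (prd, opn + 1) := rfl
      simp only [List.foldl_cons, List.map_cons, e1, e2, ih]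
      rw [List.count_cons_self, List.count_cons_of_ne (by decide : true ≠ false)]
      refine Prod.ext ?_ rfl
      show bal + 1 + (bl.count true : Int) - (bl.count false : Int)
          = bal + ((bl.count true + 1 : Nat) : Int) - (bl.count false : Int)
      push_cast
      ring

theorem pvCountMap (bl : List Bool) :
    PySem.List.count (bl.map pvToChar) 'L' = bl.count true ∧
    PySem.List.count (bl.map pvToChar) 'R' = bl.count false := by
  induction bl with
  | nil => simp [PySem.List.count]
  | cons b bl ih =>
    obtain ⟨ih1, ih2⟩ := ih
    cases b <;>
      simp [PySem.List.count, pvToChar] at * <;> omega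

-- ===== VERDICT =====
theorem count_ways_to_make_squares_white_spec : Claim_equal_count_ways_to_make_squares_white := by
  intro N S _ _
  show count_ways_to_make_squares_white N S = count_ways_to_make_squares_white_alt N S
  have hmd : (0 : Int) < 10 ^ 9 + 7 := by norm_num
  have eA : count_ways_to_make_squares_white N S =
      (if ((PySem.Str.pyGet? S 0).getD ' ' == 'W' || (PySem.Str.pyGet? S (-1)).getD ' ' == 'W')
       then 0
       else
         (if PySem.List.count ((PySem.List.pyRange 1 (2 * N) 1).foldl (pvStepA S) ['L']) 'L'
             ≠ PySem.List.count ((PySem.List.pyRange 1 (2 * N) 1).foldl (pvStepA S) ['L']) 'R' then 0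
          else PySem.Int.mod
            ((((PySem.List.pyRange 1 (2 * N) 1).foldl (pvStepA S) ['L']).foldl
               (pvStepA2 (10 ^ 9 + 7)) (1, 0)).1 * pvFactorial N) (10 ^ 9 + 7))) := rfl
  have eB : count_ways_to_make_squares_white_alt N S =
      (if ((PySem.Str.pyGet? S 0).getD ' ' == 'W' || (PySem.Str.pyGet? S (-1)).getD ' ' == 'W')
       then 0
       else
         (if ((match pvChars N S with
               | [] => []
               | c :: rest => pvRleAux c 1 rest).foldl (pvStepRun (10 ^ 9 + 7)) (true, 0, 0, 1)).2.1 ≠ 0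
          then 0
          else PySem.Int.mod
            (((match pvChars N S with
               | [] => []
               | c :: rest => pvRleAux c 1 rest).foldl (pvStepRun (10 ^ 9 + 7)) (true, 0, 0, 1)).2.2.2
              * pvFactorial N) (10 ^ 9 + 7))) := rfl
  rw [eA, eB]
  by_cases hg : ((PySem.Str.pyGet? S 0).getD ' ' == 'W' || (PySem.Str.pyGet? S (-1)).getD ' ' == 'W') = true
  · rw [if_pos hg, if_pos hg]
  · rw [if_neg hg, if_neg hg]
    by_cases hN : 2 * N ≤ 1
    · -- degenerate: A's loop is empty, B scans the single square S[0]
      rw [PySem.List.pyRange_one_eq_nil hN]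
      simp only [List.foldl_nil]
      have hchars : pvChars N S = [(PySem.Str.pyGet? S 0).getD ' '] := by
        unfold pvChars
        have hmax : max 1 (2 * N) = 1 := by omega
        rw [hmax]
        have h01 : PySem.List.pyRange 0 (1 : Int) 1 = [0] := by
          have h := PySem.List.pyRange_one_singleton (0 : Int)
          norm_num at h
          exact h
        rw [h01]
        rfl
      have hmatch : (match pvChars N S with
          | [] => []
          | c :: rest => pvRleAux c 1 rest) = [1] := by
        rw [hchars]
        rfl
      rw [hmatch]
      have hstep : (List.foldl (pvStepRun (10 ^ 9 + 7)) (true, 0, 0, 1) [1]).2.1 = (1 : Int) := by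
        norm_num [pvStepRun]
      rw [if_pos (show PySem.List.count ['L'] 'L' ≠ PySem.List.count ['L'] 'R' by decide)]
      rw [if_pos (by rw [hstep]; norm_num)]
    · -- main case: 2 ≤ 2*N
      have h2N : 2 ≤ 2 * N := by omega
      have hArr := pvArrEq S (2 * N - 1).toNat 1 ['L'] true (le_refl 1) rfl rfl
      have hmm1 : ((1 + (2 * N - 1).toNat : Nat) : Int) = 2 * N := by
        push_cast
        omega
      rw [hmm1] at hArr
      simp only [Nat.cast_one, show (1 : Int) - 1 = 0 from by norm_num] at hArr
      set REST : List Char :=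
        (List.range' 1 (2 * N - 1).toNat).map (fun (j : Nat) => pvCh S (j : Int)) with hREST
      set C0 : Char := pvCh S 0 with hC0
      set BL : List Bool := true :: pvStFrom true C0 REST with hBL
      have hbl : (PySem.List.pyRange 1 (2 * N) 1).foldl (pvStepA S) ['L'] = BL.map pvToChar := by
        rw [hArr]
        rfl
      set RUNS : List Nat := pvRleAux C0 1 REST with hRUNS
      have hTop : BL = pvGoB true RUNS := pvTop REST C0 true
      have hchars : pvChars N S = C0 :: REST := by
        unfold pvChars
        have hmax : max 1 (2 * N) = 2 * N := by omega
        rw [hmax, PySem.List.pyRange_one_cons (by omega : (0 : Int) < 2 * N)]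
        simp only [List.map_cons, zero_add]
        congr 1
        rw [PySem.List.pyRange_one, hREST, List.range'_eq_map_range, List.map_map, List.map_map]
        apply List.map_congr_left
        intro a _
        simp only [Function.comp]
        show (PySem.Str.pyGet? S (1 + (a : Int))).getD ' ' = pvCh S ((1 + a : Nat) : Int)
        unfold pvCh
        push_cast
        rfl
      have hmatch : (match pvChars N S with
          | [] => []
          | c :: rest => pvRleAux c 1 rest) = RUNS := by
        rw [hchars]
      have hFold := pvFoldA_spec (10 ^ 9 + 7) BL 0 0 1
      have hMain := pvMain (10 ^ 9 + 7) hmd RUNS true 0 0 1 (by norm_num) (by norm_num)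
      rw [← hTop, hFold] at hMain
      have hbal : ((RUNS.foldl (pvStepRun (10 ^ 9 + 7)) (true, 0, 0, 1)).2).1
          = 0 + (BL.count true : Int) - (BL.count false : Int) := by rw [← hMain]
      have hprd : ((RUNS.foldl (pvStepRun (10 ^ 9 + 7)) (true, 0, 0, 1)).2).2.2
          = ((BL.map pvToChar).foldl (pvStepA2 (10 ^ 9 + 7)) (1, 0)).1 := by rw [← hMain]
      obtain ⟨hcL, hcR⟩ := pvCountMap BL
      rw [hbl, hmatch, hcL, hcR]
      by_cases hbalz : BL.count true = BL.count false
      · rw [if_neg (not_not_intro hbalz), if_neg (by rw [hbal]; omega), hprd]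
      · rw [if_pos hbalz, if_pos (by rw [hbal]; omega)]
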